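-- pv_equiv track=rewrite | github.com/camargodev/advent-of-code-2023 | day-10/src/part_2/loop_inner_size_calculator.py | count_pipes_after
-- ===== SOURCE A (Python) =====
-- def count_pipes_after(row, row_idx, min_col_idx, loop_nodes):
--     pipes_after = 0
--     for col_idx, col in enumerate(row):
--         if col_idx <= min_col_idx:
--             continue
--         if (row_idx, col_idx) in loop_nodes:
--             pipes_after +=1
--     return pipes_after
-- ===== SOURCE B (Python) =====
-- def count_pipes_after(row, row_idx, min_col_idx, loop_nodes):
--     n = len(row)
--     return sum(1 for (r, c) in set(loop_nodes)
--                if r == row_idx and c > min_col_idx and 0 <= c < n)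
-- ===== Notes on version B (the rewrite author's own statement) =====
-- stated objective: simpler
-- what changed: B iterates the (deduplicated) set of loop nodes and counts those in the target row with column in (min_col_idx, len(row)) and >= 0, instead of scanning every cell of the row and testing membership in loop_nodes.
import Mathlib
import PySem

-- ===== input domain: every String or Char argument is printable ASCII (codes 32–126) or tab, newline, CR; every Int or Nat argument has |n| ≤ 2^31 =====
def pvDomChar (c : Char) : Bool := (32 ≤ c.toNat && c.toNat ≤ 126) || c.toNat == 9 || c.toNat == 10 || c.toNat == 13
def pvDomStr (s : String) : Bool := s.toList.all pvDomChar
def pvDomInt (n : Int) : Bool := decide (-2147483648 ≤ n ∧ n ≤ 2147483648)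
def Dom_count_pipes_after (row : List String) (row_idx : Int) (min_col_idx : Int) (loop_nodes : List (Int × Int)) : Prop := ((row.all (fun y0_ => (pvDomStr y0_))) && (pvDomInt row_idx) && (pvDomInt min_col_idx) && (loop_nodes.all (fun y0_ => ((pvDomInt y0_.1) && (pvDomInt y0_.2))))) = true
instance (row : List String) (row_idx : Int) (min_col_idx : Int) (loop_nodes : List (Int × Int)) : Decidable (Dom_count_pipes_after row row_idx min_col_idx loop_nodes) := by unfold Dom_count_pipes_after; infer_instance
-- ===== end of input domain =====

-- B iterates the deduplicated set of loop nodes and counts those in the target row with an admissible column, instead of scanning every cell of the row and testing membership in loop_nodes (objective: simpler).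


-- ===== PORT A =====
def count_pipes_after (row : List String) (row_idx : Int) (min_col_idx : Int) (loop_nodes : List (Int × Int)) : Int :=
  (PySem.List.enumerate row).foldl
    (fun pipes_after p =>
      if p.1 ≤ min_col_idx then pipes_after
      else if loop_nodes.contains (row_idx, p.1) then pipes_after + 1
      else pipes_after) 0

-- ===== PORT B =====
def count_pipes_after_alt (row : List String) (row_idx : Int) (min_col_idx : Int) (loop_nodes : List (Int × Int)) : Int :=
  let n : Int := (row.length : Int)
  (((PySem.Set.ofList loop_nodes).filter
      (fun p => p.1 == row_idx && decide (min_col_idx < p.2) && decide (0 ≤ p.2) && decide (p.2 < n))).length : Int)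

-- ===== PRECONDITION & SPEC =====
def Spec_count_pipes_after (row : List String) (row_idx : Int) (min_col_idx : Int) (loop_nodes : List (Int × Int)) (out : Int) : Prop := out = count_pipes_after_alt row row_idx min_col_idx loop_nodes
instance (row : List String) (row_idx : Int) (min_col_idx : Int) (loop_nodes : List (Int × Int)) (out : Int) : Decidable (Spec_count_pipes_after row row_idx min_col_idx loop_nodes out) := by unfold Spec_count_pipes_after; infer_instance

-- ===== CLAIM (what is proved, stated in full; the proofs are below) =====
def Claim_equal_count_pipes_after : Prop := ∀ (row : List String) (row_idx : Int) (min_col_idx : Int) (loop_nodes : List (Int × Int)), Dom_count_pipes_after row row_idx min_col_idx loop_nodes → Spec_count_pipes_after row row_idx min_col_idx loop_nodes (count_pipes_after row row_idx min_col_idx loop_nodes)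

-- ===== LEMMAS AND PROOFS =====

-- A's loop counts the indices of `row` that pass both tests
theorem countA_eq_countP (row : List String) (row_idx min_col_idx : Int) (loop_nodes : List (Int × Int)) :
    count_pipes_after row row_idx min_col_idx loop_nodes
      = ((PySem.List.pyRange 0 (row.length : Int) 1).countP
          (fun j => !decide (j ≤ min_col_idx) && loop_nodes.contains (row_idx, j)) : Int) := by
  unfold count_pipes_after
  have hf : (fun (acc : Int) (p : Int × String) =>
        if p.1 ≤ min_col_idx then acc
        else if loop_nodes.contains (row_idx, p.1) then acc + 1 else acc)
      = fun acc p =>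
        if (!decide (p.1 ≤ min_col_idx) && loop_nodes.contains (row_idx, p.1)) then acc + 1 else acc := by
    funext acc p
    by_cases h : p.1 ≤ min_col_idx
    · simp [h]
    · cases hc : loop_nodes.contains (row_idx, p.1) <;> simp [h]
  rw [hf, PySem.List.foldl_if_add_one]
  have hm := PySem.List.map_fst_enumerate (xs := row) (s := 0)
  have h2 : (((PySem.List.enumerate row).map (fun p => p.1)).countP
        (fun j => !decide (j ≤ min_col_idx) && loop_nodes.contains (row_idx, j)))
      = ((PySem.List.enumerate row).countP
        (fun p => !decide (p.1 ≤ min_col_idx) && loop_nodes.contains (row_idx, p.1))) := by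
    rw [List.countP_map]; rfl
  rw [← h2, hm]
  simp

theorem filters_perm (row : List String) (row_idx min_col_idx : Int) (loop_nodes : List (Int × Int)) :
    (((PySem.List.pyRange 0 (row.length : Int) 1).filter
        (fun j => !decide (j ≤ min_col_idx) && loop_nodes.contains (row_idx, j))).map
      (fun c => (row_idx, c))).Perm
    ((PySem.Set.ofList loop_nodes).filter
      (fun p => p.1 == row_idx && decide (min_col_idx < p.2) && decide (0 ≤ p.2) &&
        decide (p.2 < (row.length : Int)))) := by
  apply (List.perm_ext_iff_of_nodup ?_ ?_).mpr
  · rintro ⟨a1, a2⟩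
    simp only [List.mem_map, List.mem_filter, PySem.List.mem_pyRange_one, PySem.Set.mem_ofList,
      Bool.and_eq_true, Bool.not_eq_eq_eq_not, Bool.not_true, decide_eq_true_eq,
      decide_eq_false_iff_not, beq_iff_eq, List.contains_iff_mem, Prod.mk.injEq]
    constructor
    · rintro ⟨c, ⟨⟨hc0, hcn⟩, hgt, hmem⟩, rfl, rfl⟩
      exact ⟨hmem, ⟨⟨rfl, by omega⟩, hc0⟩, hcn⟩
    · rintro ⟨hmem, ⟨⟨rfl, hgt⟩, h0⟩, hn⟩
      exact ⟨a2, ⟨⟨h0, hn⟩, by omega, hmem⟩, rfl, rfl⟩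
  · apply List.Nodup.map
    · intro x y hxy
      simpa using congrArg Prod.snd hxy
    · exact (PySem.List.nodup_pyRange_one _ _).filter _
  · exact (PySem.Set.nodup_ofList _).filter _

theorem main_eq (row : List String) (row_idx min_col_idx : Int) (loop_nodes : List (Int × Int)) :
    count_pipes_after row row_idx min_col_idx loop_nodes
      = count_pipes_after_alt row row_idx min_col_idx loop_nodes := by
  rw [countA_eq_countP]
  unfold count_pipes_after_alt
  have hlen := (filters_perm row row_idx min_col_idx loop_nodes).length_eq
  rw [List.length_map] at hlen
  rw [List.countP_eq_length_filter, hlen]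

-- ===== VERDICT (by name: the statement is the Claim_ definition above) =====
theorem count_pipes_after_spec : Claim_equal_count_pipes_after := by
  intro row row_idx min_col_idx loop_nodes _
  exact main_eq row row_idx min_col_idx loop_nodes
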